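-- pv_equiv track=rewrite | github.com/pastly/flashflow-research | c/full-runner.py | _split_x_by_y
-- ===== SOURCE A (Python) =====
-- def _split_x_by_y(x, y):
--     ''' Divide X as evenly as possible Y ways using only ints, and return those
--     ints. Consider x=5 and y=3. 5 cannot be divided into 3 pieces evenly using
--     ints. This function would yield a generator producing 1, 2, 2.
--
--     x=8, y=5 yields 1, 2, 1, 2, 2.
--     x=6, y=3 yields 2, 2, 2
--     '''
--     frac_accum = 0
--     for iters_left in range(y-1, 0-1, -1):
--         frac_accum += x % y
--         if frac_accum >= y or not iters_left and frac_accum: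
--             yield x // y + 1
--         else:
--             yield x // y
--         if frac_accum >= y:
--             frac_accum -= y
-- ===== SOURCE B (Python) =====
-- def _split_x_by_y(x, y):
--     '''Divide x as evenly as possible y ways using only ints.
--     Each piece is the difference of consecutive floor boundaries.'''
--     for i in range(y):
--         yield (i + 1) * x // y - i * x // y
-- ===== Notes on version B (the rewrite author's own statement) =====
-- stated objective: simpler
-- what changed: Replaced the stateful remainder-diffusing accumulator (frac_accum carried across iterations with conditional subtraction and a special last-iteration clause) by a stateless closed form: piece i is the difference of floor boundaries (i+1)*x//y - i*x//y.
import Mathlib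
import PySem

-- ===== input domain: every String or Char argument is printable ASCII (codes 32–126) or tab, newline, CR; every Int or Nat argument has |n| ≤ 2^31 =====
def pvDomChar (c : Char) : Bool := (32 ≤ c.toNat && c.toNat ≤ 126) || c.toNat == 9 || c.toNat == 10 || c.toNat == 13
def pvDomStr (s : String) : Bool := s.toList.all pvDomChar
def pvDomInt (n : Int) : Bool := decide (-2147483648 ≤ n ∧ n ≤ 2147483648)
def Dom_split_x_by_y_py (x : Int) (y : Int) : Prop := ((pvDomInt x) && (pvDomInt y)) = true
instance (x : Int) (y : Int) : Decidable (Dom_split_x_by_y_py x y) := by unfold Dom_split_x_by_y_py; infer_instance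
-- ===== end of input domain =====

-- B replaces A's stateful remainder-diffusing accumulator by the stateless
-- closed form (i+1)*x//y - i*x//y per piece (simpler; same cost).

-- ===== PORT A =====
-- loop body of A: state = (frac_accum, yielded-so-far)
def pvStepA (x y : Int) (st : Int × List Int) (iters_left : Int) : Int × List Int :=
  let frac_accum := st.1 + PySem.Int.mod x y
  let out := if y ≤ frac_accum ∨ (iters_left = 0 ∧ frac_accum ≠ 0)
             then st.2 ++ [PySem.Int.floordiv x y + 1]
             else st.2 ++ [PySem.Int.floordiv x y]
  let frac_accum' := if y ≤ frac_accum then frac_accum - y else frac_accum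
  (frac_accum', out)

def split_x_by_y_py (x : Int) (y : Int) : List Int :=
  ((PySem.List.pyRange (y - 1) (0 - 1) (-1)).foldl (pvStepA x y) (0, [])).2

-- ===== PORT B =====
def split_x_by_y_py_alt (x : Int) (y : Int) : List Int :=
  (PySem.List.pyRange 0 y 1).map (fun i =>
    PySem.Int.floordiv ((i + 1) * x) y - PySem.Int.floordiv (i * x) y)

-- ===== PRECONDITION & SPEC =====
def Spec_split_x_by_y_py (x : Int) (y : Int) (out : List Int) : Prop := out = split_x_by_y_py_alt x y
instance (x : Int) (y : Int) (out : List Int) : Decidable (Spec_split_x_by_y_py x y out) := by unfold Spec_split_x_by_y_py; infer_instance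

-- ===== CLAIM (what is proved, stated in full; the proofs are below) =====
def Claim_equal_split_x_by_y_py : Prop := ∀ (x : Int) (y : Int), Dom_split_x_by_y_py x y → Spec_split_x_by_y_py x y (split_x_by_y_py x y)

-- ===== LEMMAS AND PROOFS =====

-- One addition step of the accumulator, expressed on Int.emod/ediv (0 < y).
lemma pv_add_step (x y a : Int) (hy : 0 < y) :
    ((a + x) % y = if y ≤ a % y + x % y then a % y + x % y - y else a % y + x % y) ∧
    ((a + x) / y = a / y + x / y + if y ≤ a % y + x % y then 1 else 0) := by
  have ha0 : 0 ≤ a % y := Int.emod_nonneg a (by omega)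
  have ha1 : a % y < y := Int.emod_lt_of_pos a hy
  have hx0 : 0 ≤ x % y := Int.emod_nonneg x (by omega)
  have hx1 : x % y < y := Int.emod_lt_of_pos x hy
  have hda : y * (a / y) + a % y = a := Int.mul_ediv_add_emod a y
  have hdx : y * (x / y) + x % y = x := Int.mul_ediv_add_emod x y
  by_cases h : y ≤ a % y + x % y
  · have hrepr : a + x = (a % y + x % y - y) + y * (a / y + x / y + 1) := by ring_nf; omega
    constructor
    · rw [hrepr, Int.add_mul_emod_self_left, Int.emod_eq_of_lt (by omega) (by omega)]
      simp [h]
    · rw [hrepr, Int.add_mul_ediv_left _ _ (by omega : y ≠ 0),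
        Int.ediv_eq_zero_of_lt (by omega) (by omega)]
      simp [h]
  · have hrepr : a + x = (a % y + x % y) + y * (a / y + x / y) := by ring_nf; omega
    constructor
    · rw [hrepr, Int.add_mul_emod_self_left, Int.emod_eq_of_lt (by omega) (by omega)]
      simp [h]
    · rw [hrepr, Int.add_mul_ediv_left _ _ (by omega : y ≠ 0),
        Int.ediv_eq_zero_of_lt (by omega) (by omega)]
      simp [h]

-- On the last iteration (i = y-1) a nonzero accumulator is necessarily ≥ y,
-- so A's special clause never changes the output.
lemma pv_last_step (x y : Int) (hy : 0 < y) (hne : ((y - 1) * x) % y + x % y ≠ 0) :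
    y ≤ ((y - 1) * x) % y + x % y := by
  have h1 : ((y - 1) * x) % y = (-x) % y := by
    have : (y - 1) * x = -x + y * x := by ring
    rw [this, Int.add_mul_emod_self_left]
  have h2 : ((-x) % y + x % y) % y = 0 := by
    rw [← Int.add_emod]; simp
  have hd : y ∣ (-x) % y + x % y := Int.dvd_of_emod_eq_zero h2
  have hb0 : 0 ≤ (-x) % y := Int.emod_nonneg _ (by omega)
  have hb1 : (-x) % y < y := Int.emod_lt_of_pos _ hy
  have hc0 : 0 ≤ x % y := Int.emod_nonneg x (by omega)
  have hc1 : x % y < y := Int.emod_lt_of_pos x hy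
  rcases hd with ⟨k, hk⟩
  have hk0 : 0 ≤ k := nonneg_of_mul_nonneg_right (by omega) hy
  have hk2 : k < 2 := by nlinarith
  interval_cases k <;> omega

-- Loop invariant for A: after processing i iterations frac_accum = (i*x) % y,
-- and each later iteration yields the boundary difference of B.
lemma pv_loopA (x y : Int) (hy : 0 < y) : ∀ (m i : Nat) (acc : List Int),
    (i : Int) + (m : Int) = y →
    ((PySem.List.pyRange ((m : Int) - 1) (0 - 1) (-1)).foldl (pvStepA x y)
        (((i : Int) * x) % y, acc)).2
      = acc ++ (List.range m).map
          (fun (j : Nat) => ((i : Int) + (j : Int) + 1) * x / y - ((i : Int) + (j : Int)) * x / y) := by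
  have h01 : (0:Int) - 1 = -1 := by norm_num
  intro m
  induction m with
  | zero =>
    intro i acc h
    rw [show ((0 : Nat) : Int) - 1 = -1 by norm_num, h01,
      PySem.List.pyRange_neg_one_eq_nil (le_refl _)]
    simp
  | succ m ih =>
    intro i acc h
    have hc : ((m + 1 : Nat) : Int) - 1 = (m : Int) := by push_cast; ring
    simp only [h01] at ih
    rw [hc, h01, PySem.List.pyRange_neg_one_cons (by omega : (-1 : Int) < (m : Int))]
    rw [List.foldl_cons]
    have hkey := pv_add_step x y ((i : Int) * x) hy
    have hcond : (y ≤ ((i : Int) * x) % y + x % y ∨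
        ((m : Int) = 0 ∧ ((i : Int) * x) % y + x % y ≠ 0)) ↔
        y ≤ ((i : Int) * x) % y + x % y := by
      constructor
      · rintro (h1 | ⟨hm0, hne⟩)
        · exact h1
        · have hi : (i : Int) = y - 1 := by omega
          rw [hi] at hne ⊢
          exact pv_last_step x y hy hne
      · exact Or.inl
    have harg : ((i : Int) + 1) * x = (i : Int) * x + x := by ring
    have hstep : pvStepA x y (((i : Int) * x) % y, acc) (m : Int)
        = ((((i : Int) + 1) * x) % y,
           acc ++ [((i : Int) + 1) * x / y - (i : Int) * x / y]) := by
      unfold pvStepA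
      simp only [PySem.Int.mod_eq_emod_of_pos hy, PySem.Int.floordiv_eq_ediv_of_pos hy,
        hcond, harg, hkey.1, hkey.2, Prod.mk.injEq]
      by_cases hge : y ≤ (i : Int) * x % y + x % y
      · simp only [if_pos hge]
        refine ⟨by trivial, ?_⟩
        rw [show (i : Int) * x / y + x / y + 1 - (i : Int) * x / y = x / y + 1 by ring]
      · simp only [if_neg hge]
        refine ⟨by trivial, ?_⟩
        rw [show (i : Int) * x / y + x / y + 0 - (i : Int) * x / y = x / y by ring]
    rw [hstep]
    have hi1 : (((i + 1 : Nat)) : Int) = (i : Int) + 1 := by push_cast; ring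
    have := ih (i + 1) (acc ++ [((i : Int) + 1) * x / y - (i : Int) * x / y]) (by push_cast; omega)
    rw [hi1] at this
    rw [this, List.append_assoc]
    congr 1
    rw [List.range_succ_eq_map, List.map_cons, List.map_map, List.singleton_append,
      List.cons.injEq]
    refine ⟨by push_cast; ring_nf, ?_⟩
    apply List.map_congr_left
    intro j _
    simp only [Function.comp_apply, Nat.succ_eq_add_one]
    push_cast
    ring_nf

-- ===== VERDICT (by name: the statement is the Claim_ definition above) =====
theorem split_x_by_y_py_spec : Claim_equal_split_x_by_y_py := by
  intro x y _
  unfold Spec_split_x_by_y_py split_x_by_y_py split_x_by_y_py_alt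
  by_cases hy : y ≤ 0
  · rw [show (0:Int) - 1 = -1 by norm_num, PySem.List.pyRange_neg_one_eq_nil (by omega), PySem.List.pyRange_one_eq_nil (by omega)]
    simp
  · have hy' : 0 < y := by omega
    have hmain := pv_loopA x y hy' y.toNat 0 [] (by simp; omega)
    have hyc : ((y.toNat : Nat) : Int) = y := Int.toNat_of_nonneg (by omega)
    rw [hyc] at hmain
    simp only [Int.natCast_zero, zero_mul, Int.zero_emod,
      List.nil_append] at hmain
    rw [hmain, PySem.List.pyRange_one]
    rw [show y - 0 = y by ring, List.map_map]
    apply List.map_congr_left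
    intro j _
    simp only [Function.comp_apply, PySem.Int.floordiv_eq_ediv_of_pos hy']
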